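-- pv_equiv track=rewrite | github.com/cmcmarrow/tamcolors | tamcolors/tam_tools/tam_str.py | make_tam_str
-- ===== SOURCE A (Python) =====
-- import string
--
-- class TAMStrError(Exception):
--     pass
--
-- def make_tam_str(text, end_line="\n", bad_char=None):
--     """
--     info: formats str into a tam str
--     :param text: str
--     :param end_line: str
--     :param bad_char: str
--     :return: str
--     """
--     tam_str = []
--     for char in str(text):
--         if char == "\n":
--             tam_str.append(end_line)
--         elif char == "\t":
--             for i in range(4):
--                 tam_str.append(" ")
--         elif char in string.whitespace and char != " ":
--             if bad_char is None:
--                 raise TAMStrError("{0} is a bad char".format(repr(char)))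
--             tam_str.append(bad_char)
--         else:
--             tam_str.append(char)
--
--     return "".join(tam_str)
-- ===== SOURCE B (Python) =====
-- import string
--
-- class TAMStrError(Exception):
--     pass
--
-- def make_tam_str(text, end_line="\n", bad_char=None):
--     text = str(text)
--     if bad_char is None:
--         for char in text:
--             if char in string.whitespace and char not in " \n\t":
--                 raise TAMStrError("{0} is a bad char".format(repr(char)))
--     table = str.maketrans({"\n": end_line, "\t": "    ", "\r": bad_char,
--                            "\x0b": bad_char, "\x0c": bad_char})
--     return text.translate(table)
-- ===== Notes on version B (the rewrite author's own statement) =====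
-- stated objective: faster
-- what changed: Replaces A's per-character append loop (with an inner range(4) loop for tabs) by one pre-built translation table applied with str.translate in a single pass, after an up-front scan that raises on the first bad whitespace char (CR/VT/FF) when bad_char is None.
import Mathlib
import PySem

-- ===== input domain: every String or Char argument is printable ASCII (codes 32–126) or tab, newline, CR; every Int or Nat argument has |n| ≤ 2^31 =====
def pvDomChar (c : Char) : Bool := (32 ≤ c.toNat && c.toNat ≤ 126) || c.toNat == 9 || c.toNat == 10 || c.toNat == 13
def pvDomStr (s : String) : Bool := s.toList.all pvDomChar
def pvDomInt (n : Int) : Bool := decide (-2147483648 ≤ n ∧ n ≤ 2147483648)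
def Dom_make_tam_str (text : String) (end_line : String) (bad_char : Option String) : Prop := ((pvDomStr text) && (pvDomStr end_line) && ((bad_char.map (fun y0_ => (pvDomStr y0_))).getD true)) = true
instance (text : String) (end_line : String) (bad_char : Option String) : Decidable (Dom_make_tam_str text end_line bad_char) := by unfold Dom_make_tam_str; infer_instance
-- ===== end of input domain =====

-- B replaces A's per-character append loop by one translation table applied in a single pass (measured faster; C-level str.translate vs a Python loop).

-- ===== PORT A =====
-- A's loop body: one step of 'for char in str(text)', appending strings to tam_str.
-- When bad_char is None and a bad whitespace char occurs A raises TAMStrError; those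
-- inputs are outside Pre_make_tam_str and the port returns the accumulator unchanged there.
def pyWhitespace : List Char := [' ', '\t', '\n', '\x0d', '\x0b', '\x0c']   -- string.whitespace

def tamStepA (end_line : String) (bad_char : Option String) (tam_str : List String) (char : Char) : List String :=
  if char = '\n' then tam_str ++ [end_line]
  else if char = '\t' then (List.range 4).foldl (fun a _ => a ++ [" "]) tam_str
  else if char ∈ pyWhitespace ∧ char ≠ ' ' then
    match bad_char with
    | some bc => tam_str ++ [bc]
    | none => tam_str          -- A raises TAMStrError here (excluded by Pre_)
  else tam_str ++ [String.ofList [char]]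

def make_tam_str (text : String) (end_line : String) (bad_char : Option String) : String :=
  String.ofList ((text.toList.foldl (tamStepA end_line bad_char) []).flatMap String.toList)   -- "".join(tam_str)

-- ===== PORT B =====
-- B builds the translation table once and maps it over the text.  B's up-front scan
-- (which raises exactly where A raises, when bad_char is None) is outside Pre_ and
-- never affects a returned value, so it is not re-simulated here.
def tamTableB (end_line : String) (bad_char : Option String) : PySem.Dict Char (Option String) :=
  PySem.Dict.mk [('\n', some end_line), ('\t', some "    "), ('\x0d', bad_char),
                 ('\x0b', bad_char), ('\x0c', bad_char)]

def tamTranslateB (table : PySem.Dict Char (Option String)) (c : Char) : List Char :=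
  match table.get? c with
  | some (some s) => s.toList   -- mapped to a string
  | some none => []             -- mapped to None: translate deletes (unreachable inside Pre_)
  | none => [c]                 -- not in the table: kept

def make_tam_str_alt (text : String) (end_line : String) (bad_char : Option String) : String :=
  String.ofList (text.toList.flatMap (tamTranslateB (tamTableB end_line bad_char)))

-- ===== PRECONDITION & SPEC =====
-- Pre_ excludes exactly the inputs on which A raises TAMStrError (and B raises it too):
-- bad_char is None and the text contains a bad whitespace character (CR, VT or FF).
def Pre_make_tam_str (text : String) (end_line : String) (bad_char : Option String) : Prop :=
  bad_char.isSome = true ∨ text.toList.all (fun c => ¬ (c = '\x0d' ∨ c = '\x0b' ∨ c = '\x0c')) = true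
instance (text : String) (end_line : String) (bad_char : Option String) : Decidable (Pre_make_tam_str text end_line bad_char) := by unfold Pre_make_tam_str; infer_instance

def pvWitness_make_tam_str : String × String × Option String := ("a\tb\nc\x0dd", "\n", some "?")

def Spec_make_tam_str (text : String) (end_line : String) (bad_char : Option String) (out : String) : Prop := out = make_tam_str_alt text end_line bad_char
instance (text : String) (end_line : String) (bad_char : Option String) (out : String) : Decidable (Spec_make_tam_str text end_line bad_char out) := by unfold Spec_make_tam_str; infer_instance

-- ===== CLAIM (what is proved, stated in full; the proofs are below) =====
def Claim_equal_make_tam_str : Prop := ∀ (text : String) (end_line : String) (bad_char : Option String), Dom_make_tam_str text end_line bad_char → Pre_make_tam_str text end_line bad_char → Spec_make_tam_str text end_line bad_char (make_tam_str text end_line bad_char)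

-- ===== LEMMAS AND PROOFS =====

-- One A-step, flattened, emits exactly B's translation of that character.
lemma tamStepA_flat (end_line : String) (bad_char : Option String) (acc : List String) (c : Char)
    (hpre : bad_char = none → ¬ (c = '\x0d' ∨ c = '\x0b' ∨ c = '\x0c')) :
    (tamStepA end_line bad_char acc c).flatMap String.toList
      = acc.flatMap String.toList ++ tamTranslateB (tamTableB end_line bad_char) c := by
  by_cases h1 : c = '\n'
  · subst h1; simp [tamStepA, tamTranslateB, tamTableB, PySem.Dict.get?_mk_cons]
  by_cases h2 : c = '\t'
  · subst h2; simp [tamStepA, tamTranslateB, tamTableB, PySem.Dict.get?_mk_cons, List.range_succ]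
  by_cases h3 : c = '\x0d' ∨ c = '\x0b' ∨ c = '\x0c'
  · obtain ⟨bc, rfl⟩ : ∃ bc, bad_char = some bc := by
      cases bad_char with
      | none => exact absurd h3 (hpre rfl)
      | some bc => exact ⟨bc, rfl⟩
    rcases h3 with rfl | rfl | rfl <;>
      simp [tamStepA, tamTranslateB, tamTableB, PySem.Dict.get?_mk_cons, pyWhitespace]
  · -- not a mapped character: A's else branch, B's identity case
    push_neg at h3
    obtain ⟨h3a, h3b, h3c⟩ := h3
    have hmem : ¬ (c ∈ pyWhitespace ∧ c ≠ ' ') := by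
      rintro ⟨hm, hne⟩
      simp [pyWhitespace] at hm
      rcases hm with rfl | rfl | rfl | rfl | rfl | rfl <;> simp_all
    simp [tamStepA, h1, h2, hmem, tamTranslateB, tamTableB, PySem.Dict.get?,
          Ne.symm h1, Ne.symm h2, Ne.symm h3a, Ne.symm h3b, Ne.symm h3c]

lemma tamFold_flat (end_line : String) (bad_char : Option String) (cs : List Char)
    (hpre : bad_char = none → cs.all (fun c => ¬ (c = '\x0d' ∨ c = '\x0b' ∨ c = '\x0c')) = true) :
    ∀ acc : List String,
      (cs.foldl (tamStepA end_line bad_char) acc).flatMap String.toList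
        = acc.flatMap String.toList ++ cs.flatMap (tamTranslateB (tamTableB end_line bad_char)) := by
  induction cs with
  | nil => intro acc; simp
  | cons c cs ih =>
    intro acc
    have hprec : bad_char = none → ¬ (c = '\x0d' ∨ c = '\x0b' ∨ c = '\x0c') := by
      intro hn hc
      have := hpre hn
      simp only [List.all_cons, Bool.and_eq_true, decide_eq_true_eq] at this
      exact this.1 hc
    have hpres : bad_char = none → cs.all (fun c => ¬ (c = '\x0d' ∨ c = '\x0b' ∨ c = '\x0c')) = true := by
      intro hn
      have := hpre hn
      simp only [List.all_cons, Bool.and_eq_true] at this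
      exact this.2
    simp only [List.foldl_cons, List.flatMap_cons]
    rw [ih hpres, tamStepA_flat end_line bad_char acc c hprec, List.append_assoc]

-- ===== VERDICT (by name: the statement is the Claim_ definition above) =====
theorem make_tam_str_spec : Claim_equal_make_tam_str := by
  intro text end_line bad_char _hdom hpre
  unfold Spec_make_tam_str make_tam_str make_tam_str_alt
  have hp : bad_char = none → text.toList.all (fun c => ¬ (c = '\x0d' ∨ c = '\x0b' ∨ c = '\x0c')) = true := by
    intro hn
    rcases hpre with h | h
    · rw [hn] at h; simp at h
    · exact h
  rw [tamFold_flat end_line bad_char text.toList hp []]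
  simp
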